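-- pv_equiv track=rewrite | github.com/tony-wang1990/KKing-Detective | fix_all_java.py | is_in_string
-- ===== SOURCE A (Python) =====
-- def is_in_string(line, pos):
--     """Rough check: is character at pos inside a string literal?"""
--     temp = line.replace('\\\\', 'XX').replace('\\"', 'YY')
--     in_string = False
--     for i, c in enumerate(temp):
--         if i == pos:
--             return in_string
--         if c == '"':
--             in_string = not in_string
--     return False
-- ===== SOURCE B (Python) =====
-- def is_in_string(line, pos):
--     """Rough check: is character at pos inside a string literal?"""
--     temp = line.replace('\\\\', 'XX').replace('\\"', 'YY')
--     if pos < 0 or pos >= len(temp):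
--         return False
--     quotes = [i for i, c in enumerate(temp) if c == '"']
--     # binary search: lo ends as the number of quote positions < pos
--     lo, hi = 0, len(quotes)
--     while lo < hi:
--         mid = (lo + hi) // 2
--         if quotes[mid] < pos:
--             lo = mid + 1
--         else:
--             hi = mid
--     return lo % 2 == 1
-- ===== Notes on version B (the rewrite author's own statement) =====
-- stated objective: alternative
-- what changed: Replaces A's left-to-right toggle scan with early return by: a range guard, a precomputed list of quote positions, and a hand-written binary search over that list whose insertion point's parity answers the query.
import Mathlib
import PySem

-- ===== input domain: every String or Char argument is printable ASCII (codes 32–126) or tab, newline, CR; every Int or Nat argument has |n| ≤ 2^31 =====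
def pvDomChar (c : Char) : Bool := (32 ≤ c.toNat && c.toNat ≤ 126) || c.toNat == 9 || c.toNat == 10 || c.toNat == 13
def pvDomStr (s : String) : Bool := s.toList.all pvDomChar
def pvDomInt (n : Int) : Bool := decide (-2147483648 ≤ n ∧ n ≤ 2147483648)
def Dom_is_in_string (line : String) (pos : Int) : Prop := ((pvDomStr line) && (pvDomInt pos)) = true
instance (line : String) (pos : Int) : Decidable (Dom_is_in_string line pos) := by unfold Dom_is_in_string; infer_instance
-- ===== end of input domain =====

-- B replaces A's toggling-boolean scan with a range guard, a precomputed list of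
-- quote positions and a binary search over it whose insertion point's parity answers
-- the query (objective: alternative).

-- ===== PORT A =====
-- the 'for i, c in enumerate(temp)' loop with its early 'return in_string' and the toggle on '"'
def pvLoopA : List Char → Int → Int → Bool → Bool
  | [], _, _, _ => false
  | c :: rest, i, pos, s =>
    if i = pos then s
    else pvLoopA rest (i + 1) pos (if c = '"' then !s else s)

def is_in_string (line : String) (pos : Int) : Bool :=
  let temp := PySem.Str.replace (PySem.Str.replace line "\\\\" "XX") "\\\"" "YY"
  pvLoopA temp.toList 0 pos false

-- ===== PORT B =====
-- Source B's while-loop binary search; 'quotes[mid]' is ported as getD with default 0,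
-- exact here because the loop keeps mid < hi ≤ len(quotes) (proved in pvBsearch_spec)
def pvBsearch (quotes : List Int) (pos : Int) (lo hi : Nat) : Nat :=
  if lo < hi then
    let mid := (lo + hi) / 2
    if quotes.getD mid 0 < pos then pvBsearch quotes pos (mid + 1) hi
    else pvBsearch quotes pos lo mid
  else lo
termination_by hi - lo
decreasing_by all_goals omega

def is_in_string_alt (line : String) (pos : Int) : Bool :=
  let temp := PySem.Str.replace (PySem.Str.replace line "\\\\" "XX") "\\\"" "YY"
  if pos < 0 ∨ PySem.Str.len temp ≤ pos then false
  else
    let quotes := ((PySem.List.enumerate temp.toList 0).filter (fun p => p.2 == '"')).map (·.1)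
    pvBsearch quotes pos 0 quotes.length % 2 == 1

-- ===== PRECONDITION & SPEC =====
def Spec_is_in_string (line : String) (pos : Int) (out : Bool) : Prop := out = is_in_string_alt line pos
instance (line : String) (pos : Int) (out : Bool) : Decidable (Spec_is_in_string line pos out) := by unfold Spec_is_in_string; infer_instance

-- ===== CLAIM (what is proved, stated in full; the proofs are below) =====
def Claim_equal_is_in_string : Prop := ∀ (line : String) (pos : Int), Dom_is_in_string line pos → Spec_is_in_string line pos (is_in_string line pos)

-- ===== LEMMAS AND PROOFS =====

-- A's loop only compares i to pos, so the start index can be shifted onto pos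
theorem pvLoopA_shift (l : List Char) : ∀ (i pos : Int) (s : Bool),
    pvLoopA l i pos s = pvLoopA l 0 (pos - i) s := by
  induction l with
  | nil => intro i pos s; rfl
  | cons c rest ih =>
    intro i pos s
    simp only [pvLoopA]
    by_cases h : i = pos
    · simp [h]
    · have hne : ¬(0 : Int) = pos - i := by omega
      rw [if_neg h, if_neg hne, ih (i + 1) pos, ih (0 + 1) (pos - i)]
      congr 1
      ring

-- characterisation of A's loop: in range, the answer is the prefix-quote parity applied to the start state
theorem pvLoopA_eq (l : List Char) : ∀ (pos : Int) (s : Bool),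
    pvLoopA l 0 pos s =
      if 0 ≤ pos ∧ pos < (l.length : Int) then
        (if (l.take pos.toNat).count '"' % 2 == 1 then !s else s)
      else false := by
  induction l with
  | nil =>
    intro pos s
    rw [if_neg (by rintro ⟨h1, h2⟩; simp at h2; omega)]
    rfl
  | cons c rest ih =>
    intro pos s
    simp only [pvLoopA]
    by_cases h0 : (0 : Int) = pos
    · subst h0
      simp
    · rw [if_neg h0, pvLoopA_shift, show pos - (0 + 1) = pos - 1 from by ring, ih]
      by_cases hneg : pos < 0
      · rw [if_neg (by omega), if_neg (by intro hh; simp at hh; omega)]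
      · have hpos : 0 < pos := by omega
        have htn : pos.toNat = (pos - 1).toNat + 1 := by omega
        by_cases hlt : pos - 1 < (rest.length : Int)
        · rw [if_pos (show (0:Int) ≤ pos - 1 ∧ pos - 1 < (rest.length : Int) from ⟨by omega, hlt⟩),
              if_pos (show (0:Int) ≤ pos ∧ pos < ((c :: rest).length : Int) from ⟨by omega, by simp; omega⟩),
              htn, List.take_succ_cons, List.count_cons]
          set q := (rest.take (pos - 1).toNat).count '"' with hq
          by_cases hc : c = '"'
          · rcases Nat.mod_two_eq_zero_or_one q with h | h
            · have h1 : (q + 1) % 2 = 1 := by omega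
              simp [hc, h, h1]
            · have h1 : (q + 1) % 2 = 0 := by omega
              simp [hc, h, h1]
          · have hb : (c == '"') = false := by simp [hc]
            simp [hc, hb]
        · rw [if_neg (by intro hh; exact hlt hh.2),
              if_neg (by intro hh; have := hh.2; simp at this; omega)]

-- in a strictly sorted list, getD is monotone below the length
theorem pvSorted_getD_le (l : List Int) (hs : l.Pairwise (· < ·)) (i j : Nat)
    (hij : i ≤ j) (hj : j < l.length) : l.getD i 0 ≤ l.getD j 0 := by
  rcases Nat.lt_or_ge i j with h | h
  · rw [List.getD_eq_getElem l 0 (lt_trans h hj), List.getD_eq_getElem l 0 hj]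
    exact le_of_lt (List.pairwise_iff_getElem.mp hs i j (lt_trans h hj) hj h)
  · have : i = j := by omega
    subst this; rfl

-- the binary search maintains its bracketing invariant and lands on the boundary
theorem pvBsearch_spec (quotes : List Int) (pos : Int) (hs : quotes.Pairwise (· < ·)) :
    ∀ (n lo hi : Nat), hi - lo = n → lo ≤ hi → hi ≤ quotes.length →
    (∀ i, i < lo → quotes.getD i 0 < pos) →
    (∀ i, hi ≤ i → i < quotes.length → ¬ quotes.getD i 0 < pos) →
    (∀ i, i < pvBsearch quotes pos lo hi → quotes.getD i 0 < pos) ∧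
    (∀ i, pvBsearch quotes pos lo hi ≤ i → i < quotes.length → ¬ quotes.getD i 0 < pos) ∧
    pvBsearch quotes pos lo hi ≤ quotes.length := by
  intro n
  induction n using Nat.strong_induction_on with
  | _ n ih =>
    intro lo hi hn hle hlen hlow hhigh
    by_cases h : lo < hi
    · rw [pvBsearch, if_pos h]
      set mid := (lo + hi) / 2 with hmid
      have hm1 : lo ≤ mid := by omega
      have hm2 : mid < hi := by omega
      by_cases hq : quotes.getD mid 0 < pos
      · rw [if_pos hq]
        refine ih (hi - (mid + 1)) (by omega) (mid + 1) hi rfl (by omega) hlen ?_ hhigh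
        intro i hi'
        exact lt_of_le_of_lt (pvSorted_getD_le quotes hs i mid (by omega) (by omega)) hq
          |>.trans_le (le_refl pos) |> (fun h => h)
      · rw [if_neg hq]
        refine ih (mid - lo) (by omega) lo mid rfl (by omega) (by omega) hlow ?_
        intro i hi1 hi2 hcon
        exact hq (lt_of_le_of_lt (pvSorted_getD_le quotes hs mid i hi1 hi2) hcon)
    · rw [pvBsearch, if_neg h]
      have : lo = hi := by omega
      subst this
      exact ⟨hlow, hhigh, hlen⟩

-- a boundary at r determines countP
theorem pvCountP_boundary (l : List Int) (p : Int → Bool) (r : Nat) (hr : r ≤ l.length)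
    (h1 : ∀ i, i < r → p (l.getD i 0) = true)
    (h2 : ∀ i, r ≤ i → i < l.length → p (l.getD i 0) = false) :
    l.countP p = r := by
  conv_lhs => rw [← List.take_append_drop r l]
  rw [List.countP_append]
  have ht : (l.take r).countP p = (l.take r).length := by
    rw [List.countP_eq_length]
    intro a ha
    rcases List.mem_iff_getElem.mp ha with ⟨i, hi, rfl⟩
    have hil : i < l.length := by simp at hi; omega
    rw [List.getElem_take, ← List.getD_eq_getElem l 0 hil]
    exact h1 i (by simp at hi; omega)
  have hd : (l.drop r).countP p = 0 := by
    rw [List.countP_eq_zero]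
    intro a ha
    rcases List.mem_iff_getElem.mp ha with ⟨i, hi, rfl⟩
    have hil : r + i < l.length := by simp at hi; omega
    rw [List.getElem_drop, ← List.getD_eq_getElem l 0 hil]
    intro hcon
    rw [h2 (r + i) (by omega) hil] at hcon
    cases hcon
  rw [ht, hd, List.length_take]
  omega

-- the quote-position index is strictly increasing
theorem pvQuotes_sorted (l : List Char) (s : Int) :
    (((PySem.List.enumerate l s).filter (fun p => p.2 == '"')).map (·.1)).Pairwise (· < ·) := by
  exact List.Pairwise.map _ (fun _ _ h => h)
    ((PySem.List.pairwise_lt_enumerate l s).filter _)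

-- counting index entries below pos counts quotes in the prefix
theorem pvQuotes_countP (l : List Char) : ∀ (s pos : Int),
    (((PySem.List.enumerate l s).filter (fun p => p.2 == '"')).map (·.1)).countP
      (fun q => decide (q < pos)) = (l.take (pos - s).toNat).count '"' := by
  induction l with
  | nil => intro s pos; simp [PySem.List.enumerate]
  | cons c rest ih =>
    intro s pos
    rw [PySem.List.enumerate_cons]
    by_cases hpos : pos ≤ s
    · have ht : (pos - s).toNat = 0 := by omega
      rw [ht, List.take_zero, List.count_nil, List.countP_eq_zero]
      intro a ha
      simp only [List.mem_map, List.mem_filter] at ha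
      rcases ha with ⟨p, ⟨hp, _⟩, rfl⟩
      -- p ∈ (s,c) :: enumerate rest (s+1): its first component is ≥ s
      rcases List.mem_cons.mp hp with h | h
      · subst h; simp; omega
      · rcases (PySem.List.mem_enumerate_iff _ _ _).mp h with ⟨k, hk, rfl⟩
        simp; omega
    · have htn : (pos - s).toNat = (pos - (s + 1)).toNat + 1 := by omega
      rw [htn, List.take_succ_cons, List.count_cons, List.filter_cons]
      by_cases hc : c = '"'
      · have hb : ((s, c).2 == '"') = true := by simp [hc]
        rw [if_pos hb, List.map_cons, List.countP_cons, ih (s + 1) pos]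
        have : (decide (s < pos)) = true := by simp; omega
        simp [hc, this]
      · have hb : ((s, c).2 == '"') = false := by simp [hc]
        rw [if_neg (by simp [hb]), ih (s + 1) pos]
        have : (c == '"') = false := by simp [hc]
        simp [this]

-- in range, B's binary search computes the prefix quote count
theorem pvAlt_count (l : List Char) (pos : Int) (hpos : 0 ≤ pos) :
    pvBsearch (((PySem.List.enumerate l 0).filter (fun p => p.2 == '"')).map (·.1)) pos 0
      (((PySem.List.enumerate l 0).filter (fun p => p.2 == '"')).map (·.1)).length
      = (l.take pos.toNat).count '"' := by
  obtain ⟨h1, h2, h3⟩ := pvBsearch_spec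
    (((PySem.List.enumerate l 0).filter (fun p => p.2 == '"')).map (·.1)) pos
    (pvQuotes_sorted l 0) _ 0 _ rfl (Nat.zero_le _) le_rfl
    (by intro i hi; omega) (by intro i hi1 hi2; omega)
  have hb := pvCountP_boundary _ (fun q => decide (q < pos)) _ h3
    (by intro i hi; exact decide_eq_true (h1 i hi))
    (by intro i hi1 hi2; exact decide_eq_false (h2 i hi1 hi2))
  rw [← hb, pvQuotes_countP]
  congr 2
  omega

-- both ports build the same temp; with it abstract, the two sides agree
theorem pvMain (t : String) (pos : Int) :
    pvLoopA t.toList 0 pos false =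
      (if pos < 0 ∨ PySem.Str.len t ≤ pos then false
       else pvBsearch (((PySem.List.enumerate t.toList 0).filter (fun p => p.2 == '"')).map (·.1))
              pos 0
              (((PySem.List.enumerate t.toList 0).filter (fun p => p.2 == '"')).map (·.1)).length
              % 2 == 1) := by
  rw [pvLoopA_eq, PySem.Str.len_eq]
  by_cases h : 0 ≤ pos ∧ pos < (t.toList.length : Int)
  · rw [if_pos h,
        if_neg (show ¬(pos < 0 ∨ (t.toList.length : Int) ≤ pos) by omega)]
    rw [pvAlt_count t.toList pos h.1]
    cases hb : ((t.toList.take pos.toNat).count '"' % 2 == 1) <;> simp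
  · rw [if_neg h, if_pos (show pos < 0 ∨ (t.toList.length : Int) ≤ pos by omega)]

-- ===== VERDICT (by name: the statement is the Claim_ definition above) =====
theorem is_in_string_spec : Claim_equal_is_in_string := by
  intro line pos _
  unfold Spec_is_in_string is_in_string is_in_string_alt
  exact pvMain _ pos
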